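-- pv_equiv track=rewrite | github.com/erhewlett/CSC-4210-Task2 | kmap.py | group_to_implicant
-- ===== SOURCE A (Python) =====
-- def group_to_implicant(group):
--     # convert a group of cells into a pattern and mask
--     indices = sorted(group)
--     first = indices[0]
--     mask = 0
--     for other_index in indices[1:]:
--         mask |= first ^ other_index
--     pattern = first & ~mask
--     return pattern, mask, frozenset(group)
-- ===== SOURCE B (Python) =====
-- def group_to_implicant(group):
--     # one pass: aggregate AND/OR of all cells; disagreement bits = or ^ and
--     cells = list(group)
--     and_all = or_all = cells[0]
--     for c in cells[1:]:
--         and_all &= c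
--         or_all |= c
--     mask = or_all ^ and_all
--     pattern = and_all & ~mask
--     return pattern, mask, frozenset(group)
-- ===== Notes on version B (the rewrite author's own statement) =====
-- stated objective: simpler
-- what changed: Replaces sort + per-element XOR-with-minimum accumulation by a single unsorted pass maintaining bitwise AND and OR aggregates; mask = or^and and pattern = and & ~mask follow from bit identities.
import Mathlib
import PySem

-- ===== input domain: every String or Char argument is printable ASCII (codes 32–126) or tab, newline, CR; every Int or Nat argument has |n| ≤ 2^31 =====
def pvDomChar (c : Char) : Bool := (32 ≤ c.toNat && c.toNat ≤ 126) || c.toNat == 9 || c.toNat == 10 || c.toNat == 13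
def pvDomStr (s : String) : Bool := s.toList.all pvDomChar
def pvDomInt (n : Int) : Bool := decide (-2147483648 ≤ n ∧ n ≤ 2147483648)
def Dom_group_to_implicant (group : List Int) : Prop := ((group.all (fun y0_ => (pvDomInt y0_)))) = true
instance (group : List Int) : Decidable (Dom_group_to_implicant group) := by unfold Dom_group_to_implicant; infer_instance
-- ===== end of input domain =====

-- B replaces A's sort + OR-of-XORs-with-the-minimum by one unsorted pass keeping bitwise AND/OR aggregates (objective: simpler).

-- ===== PORT A =====
def group_to_implicant (group : List Int) : Int × Int × List Int :=
  let indices := PySem.List.sorted group (fun x => x) false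
  match indices with
  | [] => (0, 0, PySem.Set.ofList group)   -- indices[0] raises IndexError here; excluded by Pre_
  | first :: _ =>
    let mask := (PySem.List.slice indices (some 1) none).foldl
      (fun m other_index => PySem.Int.bor m (PySem.Int.bxor first other_index)) 0
    let pattern := PySem.Int.band first (Int.not mask)
    (pattern, mask, PySem.Set.ofList group)

-- ===== PORT B =====
def group_to_implicant_alt (group : List Int) : Int × Int × List Int :=
  match group with
  | [] => (0, 0, PySem.Set.ofList group)   -- cells[0] raises IndexError here; excluded by Pre_
  | c :: cs =>
    let acc := cs.foldl (fun s x => (PySem.Int.band s.1 x, PySem.Int.bor s.2 x)) (c, c)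
    let mask := PySem.Int.bxor acc.2 acc.1
    let pattern := PySem.Int.band acc.1 (Int.not mask)
    (pattern, mask, PySem.Set.ofList group)

-- ===== PRECONDITION & SPEC =====
-- Pre_ excludes only the empty list, on which both Pythons raise IndexError.
def Pre_group_to_implicant (group : List Int) : Prop := group ≠ []
instance (group : List Int) : Decidable (Pre_group_to_implicant group) := by unfold Pre_group_to_implicant; infer_instance
def pvWitness_group_to_implicant : List Int := [5, 7, 13]

def Spec_group_to_implicant (group : List Int) (out : Int × Int × List Int) : Prop := out = group_to_implicant_alt group
instance (group : List Int) (out : Int × Int × List Int) : Decidable (Spec_group_to_implicant group out) := by unfold Spec_group_to_implicant; infer_instance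

-- ===== CLAIM (what is proved, stated in full; the proofs are below) =====
def Claim_equal_group_to_implicant : Prop := ∀ (group : List Int), Dom_group_to_implicant group → Pre_group_to_implicant group → Spec_group_to_implicant group (group_to_implicant group)

-- ===== LEMMAS AND PROOFS =====

-- Nat bit toolkit: m = (m &&& y) + ldiff m y, so m - (m &&& y) = ldiff m y
theorem pv_land_add_ldiff (m : Nat) : ∀ y : Nat, (m &&& y) + Nat.ldiff m y = m := by
  induction m using Nat.binaryRec with
  | zero => intro y; simp [Nat.ldiff]
  | bit b n ih =>
    intro y
    rw [← Nat.bit_testBit_zero_shiftRight_one y, Nat.land_bit, Nat.ldiff_bit,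
      Nat.bit_val, Nat.bit_val, Nat.bit_val]
    have := ih (y >>> 1)
    cases b <;> cases y.testBit 0 <;> simp [Bool.toNat] <;> omega

theorem pv_sub_land (m y : Nat) : m - (m &&& y) = Nat.ldiff m y := by
  have := pv_land_add_ldiff m y
  omega

theorem pv_tb_coe (n : Nat) (i : Nat) : ((n : Int)).testBit i = n.testBit i := rfl

theorem pv_neg_coe_sub_one (n : Nat) : (-(n : Int) - 1) = Int.negSucc n := by
  rw [Int.negSucc_eq]; ring

theorem pv_tb_negSucc (n : Nat) (i : Nat) : (Int.negSucc n).testBit i = !n.testBit i := rfl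

theorem pv_negSucc_aux (n : Nat) : (-(Int.negSucc n) - 1).toNat = n := by
  rw [Int.negSucc_eq]
  omega

-- testBit characterizations of PySem's Python-exact bitwise operations
theorem pv_tb_band (a b : Int) (i : Nat) :
    (PySem.Int.band a b).testBit i = (a.testBit i && b.testBit i) := by
  cases a with
  | ofNat m =>
    cases b with
    | ofNat n =>
      simp only [Int.ofNat_eq_natCast, PySem.Int.band]
      rw [if_pos (Int.natCast_nonneg m), if_pos (Int.natCast_nonneg n)]
      simp only [Int.toNat_natCast, pv_tb_coe, Nat.testBit_land]
    | negSucc n =>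
      simp only [Int.ofNat_eq_natCast, PySem.Int.band]
      rw [if_pos (Int.natCast_nonneg m), if_neg (by omega : ¬ (0:Int) ≤ Int.negSucc n)]
      rw [pv_negSucc_aux, Int.toNat_natCast, pv_sub_land, pv_tb_coe, Nat.testBit_ldiff,
        pv_tb_negSucc, pv_tb_coe]
  | negSucc m =>
    cases b with
    | ofNat n =>
      simp only [Int.ofNat_eq_natCast, PySem.Int.band]
      rw [if_neg (by omega : ¬ (0:Int) ≤ Int.negSucc m), if_pos (Int.natCast_nonneg n)]
      rw [pv_negSucc_aux, Int.toNat_natCast, pv_sub_land, pv_tb_coe, Nat.testBit_ldiff,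
        pv_tb_negSucc, pv_tb_coe, Bool.and_comm]
    | negSucc n =>
      simp only [PySem.Int.band]
      rw [if_neg (by omega : ¬ (0:Int) ≤ Int.negSucc m), if_neg (by omega : ¬ (0:Int) ≤ Int.negSucc n)]
      rw [pv_negSucc_aux, pv_negSucc_aux, pv_neg_coe_sub_one, pv_tb_negSucc, Nat.testBit_lor,
        pv_tb_negSucc, pv_tb_negSucc]
      cases m.testBit i <;> cases n.testBit i <;> rfl

theorem pv_tb_bor (a b : Int) (i : Nat) :
    (PySem.Int.bor a b).testBit i = (a.testBit i || b.testBit i) := by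
  cases a with
  | ofNat m =>
    cases b with
    | ofNat n =>
      simp only [Int.ofNat_eq_natCast, PySem.Int.bor]
      rw [if_pos (Int.natCast_nonneg m), if_pos (Int.natCast_nonneg n)]
      simp only [Int.toNat_natCast, pv_tb_coe, Nat.testBit_lor]
    | negSucc n =>
      simp only [Int.ofNat_eq_natCast, PySem.Int.bor]
      rw [if_pos (Int.natCast_nonneg m), if_neg (by omega : ¬ (0:Int) ≤ Int.negSucc n)]
      rw [pv_negSucc_aux, Int.toNat_natCast, pv_sub_land, pv_neg_coe_sub_one, pv_tb_negSucc,
        Nat.testBit_ldiff, pv_tb_negSucc, pv_tb_coe]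
      cases m.testBit i <;> cases n.testBit i <;> rfl
  | negSucc m =>
    cases b with
    | ofNat n =>
      simp only [Int.ofNat_eq_natCast, PySem.Int.bor]
      rw [if_neg (by omega : ¬ (0:Int) ≤ Int.negSucc m), if_pos (Int.natCast_nonneg n)]
      rw [pv_negSucc_aux, Int.toNat_natCast, pv_sub_land, pv_neg_coe_sub_one, pv_tb_negSucc,
        Nat.testBit_ldiff, pv_tb_negSucc, pv_tb_coe]
      cases m.testBit i <;> cases n.testBit i <;> rfl
    | negSucc n =>
      simp only [PySem.Int.bor]
      rw [if_neg (by omega : ¬ (0:Int) ≤ Int.negSucc m), if_neg (by omega : ¬ (0:Int) ≤ Int.negSucc n)]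
      rw [pv_negSucc_aux, pv_negSucc_aux, pv_neg_coe_sub_one, pv_tb_negSucc, Nat.testBit_land,
        pv_tb_negSucc, pv_tb_negSucc]
      cases m.testBit i <;> cases n.testBit i <;> rfl

theorem pv_tb_bxor (a b : Int) (i : Nat) :
    (PySem.Int.bxor a b).testBit i = (a.testBit i ^^ b.testBit i) := by
  cases a with
  | ofNat m =>
    cases b with
    | ofNat n =>
      simp only [Int.ofNat_eq_natCast, PySem.Int.bxor]
      rw [if_pos (Int.natCast_nonneg m), if_pos (Int.natCast_nonneg n)]
      simp only [Int.toNat_natCast, pv_tb_coe, Nat.testBit_xor]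
    | negSucc n =>
      simp only [Int.ofNat_eq_natCast, PySem.Int.bxor]
      rw [if_pos (Int.natCast_nonneg m), if_neg (by omega : ¬ (0:Int) ≤ Int.negSucc n)]
      rw [pv_negSucc_aux, Int.toNat_natCast, pv_neg_coe_sub_one, pv_tb_negSucc, Nat.testBit_xor,
        pv_tb_negSucc, pv_tb_coe]
      cases m.testBit i <;> cases n.testBit i <;> rfl
  | negSucc m =>
    cases b with
    | ofNat n =>
      simp only [Int.ofNat_eq_natCast, PySem.Int.bxor]
      rw [if_neg (by omega : ¬ (0:Int) ≤ Int.negSucc m), if_pos (Int.natCast_nonneg n)]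
      rw [pv_negSucc_aux, Int.toNat_natCast, pv_neg_coe_sub_one, pv_tb_negSucc, Nat.testBit_xor,
        pv_tb_negSucc, pv_tb_coe]
      cases m.testBit i <;> cases n.testBit i <;> rfl
    | negSucc n =>
      simp only [PySem.Int.bxor]
      rw [if_neg (by omega : ¬ (0:Int) ≤ Int.negSucc m), if_neg (by omega : ¬ (0:Int) ≤ Int.negSucc n)]
      rw [pv_negSucc_aux, pv_negSucc_aux, pv_tb_coe, Nat.testBit_xor, pv_tb_negSucc, pv_tb_negSucc]
      cases m.testBit i <;> cases n.testBit i <;> rfl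

theorem pv_tb_not (a : Int) (i : Nat) : (Int.not a).testBit i = !a.testBit i := by
  cases a with
  | ofNat n => simp [Int.not, Int.testBit]
  | negSucc n => simp [Int.not, Int.testBit]

theorem pv_tb_zero (i : Nat) : (0 : Int).testBit i = false := by
  simp [Int.testBit]

-- Int extensionality by testBit
theorem pv_int_eq_of_tb {a b : Int} (h : ∀ i, a.testBit i = b.testBit i) : a = b := by
  cases a with
  | ofNat m =>
    cases b with
    | ofNat n =>
      have : m = n := Nat.eq_of_testBit_eq (fun i => h i)
      simp [this]
    | negSucc n =>
      exfalso
      have hm : m.testBit (m + n) = false :=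
        Nat.testBit_eq_false_of_lt (lt_of_lt_of_le Nat.lt_two_pow_self
          (Nat.pow_le_pow_right (by omega) (by omega)))
      have hn : n.testBit (m + n) = false :=
        Nat.testBit_eq_false_of_lt (lt_of_lt_of_le Nat.lt_two_pow_self
          (Nat.pow_le_pow_right (by omega) (by omega)))
      have := h (m + n)
      rw [pv_tb_negSucc] at this
      simp [Int.testBit, hm, hn] at this
  | negSucc m =>
    cases b with
    | ofNat n =>
      exfalso
      have hm : m.testBit (m + n) = false :=
        Nat.testBit_eq_false_of_lt (lt_of_lt_of_le Nat.lt_two_pow_self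
          (Nat.pow_le_pow_right (by omega) (by omega)))
      have hn : n.testBit (m + n) = false :=
        Nat.testBit_eq_false_of_lt (lt_of_lt_of_le Nat.lt_two_pow_self
          (Nat.pow_le_pow_right (by omega) (by omega)))
      have := h (m + n)
      rw [pv_tb_negSucc] at this
      simp [Int.testBit, hm, hn] at this
    | negSucc n =>
      have : m = n := Nat.eq_of_testBit_eq (fun i => by
        have := h i
        rw [pv_tb_negSucc, pv_tb_negSucc] at this
        simpa using this)
      simp [this]

-- fold characterizations at a fixed bit
theorem pv_tb_foldl_band (l : List Int) (a : Int) (i : Nat) :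
    (l.foldl PySem.Int.band a).testBit i = (a.testBit i && l.all (fun x => x.testBit i)) := by
  induction l generalizing a with
  | nil => simp
  | cons x xs ih =>
    simp only [List.foldl_cons, List.all_cons, ih, pv_tb_band, Bool.and_assoc]

theorem pv_tb_foldl_bor (l : List Int) (a : Int) (i : Nat) :
    (l.foldl PySem.Int.bor a).testBit i = (a.testBit i || l.any (fun x => x.testBit i)) := by
  induction l generalizing a with
  | nil => simp
  | cons x xs ih =>
    simp only [List.foldl_cons, List.any_cons, ih, pv_tb_bor, Bool.or_assoc]

theorem pv_tb_foldl_mask (f : Int) (l : List Int) (m0 : Int) (i : Nat) :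
    ((l.foldl (fun m x => PySem.Int.bor m (PySem.Int.bxor f x)) m0)).testBit i
      = (m0.testBit i || l.any (fun x => f.testBit i ^^ x.testBit i)) := by
  induction l generalizing m0 with
  | nil => simp
  | cons x xs ih =>
    simp only [List.foldl_cons, List.any_cons, ih, pv_tb_bor, pv_tb_bxor, Bool.or_assoc]

-- B's paired accumulator splits into the two simple folds
theorem pv_foldl_pair (l : List Int) (a o : Int) :
    l.foldl (fun s x => (PySem.Int.band s.1 x, PySem.Int.bor s.2 x)) (a, o)
      = (l.foldl PySem.Int.band a, l.foldl PySem.Int.bor o) := by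
  induction l generalizing a o with
  | nil => rfl
  | cons x xs ih => simp [List.foldl_cons, ih]

-- the Boolean heart: an any-of-XOR-with-a-member equals any XOR all
theorem pv_any_xor_mem {P : Int → Bool} {f : Int} {l : List Int} (hf : f ∈ l) :
    l.any (fun x => P f ^^ P x) = (l.any P ^^ l.all P) := by
  cases hPf : P f with
  | true =>
    have hany : l.any P = true := List.any_eq_true.2 ⟨f, hf, hPf⟩
    rw [hany]
    rw [Bool.eq_iff_iff]
    simp [List.any_eq_true]
  | false =>
    have hall : l.all P = false := by
      rw [Bool.eq_false_iff]
      intro hc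
      exact absurd (List.all_eq_true.1 hc f hf) (by simp [hPf])
    rw [hall]
    rw [Bool.eq_iff_iff]
    simp [List.any_eq_true]

theorem group_to_implicant_spec_aux (c : Int) (cs : List Int) :
    group_to_implicant (c :: cs) = group_to_implicant_alt (c :: cs) := by
  have hne : PySem.List.sorted (c :: cs) (fun x => x) false ≠ [] := by
    rw [Ne, PySem.List.sorted_eq_nil_iff]; simp
  obtain ⟨f, rest, hcons⟩ : ∃ f rest, PySem.List.sorted (c :: cs) (fun x => x) false = f :: rest := by
    cases h : PySem.List.sorted (c :: cs) (fun x => x) false with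
    | nil => exact absurd h hne
    | cons f rest => exact ⟨f, rest, rfl⟩
  have hperm : (PySem.List.sorted (c :: cs) (fun x => x) false).Perm (c :: cs) :=
    PySem.List.sorted_perm _ _ _
  rw [hcons] at hperm
  have hf_mem : f ∈ c :: cs := hperm.mem_iff.1 (by simp)
  -- unfold both ports
  unfold group_to_implicant group_to_implicant_alt
  rw [hcons]
  simp only [PySem.List.slice_from_one, List.tail_cons, pv_foldl_pair]
  -- the two interesting components
  have hmask : rest.foldl (fun m x => PySem.Int.bor m (PySem.Int.bxor f x)) 0
      = PySem.Int.bxor (cs.foldl PySem.Int.bor c) (cs.foldl PySem.Int.band c) := by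
    apply pv_int_eq_of_tb
    intro i
    rw [pv_tb_foldl_mask, pv_tb_bxor, pv_tb_foldl_bor, pv_tb_foldl_band, pv_tb_zero,
      Bool.false_or]
    have h1 : rest.any (fun x => f.testBit i ^^ x.testBit i)
        = (c :: cs).any (fun x => f.testBit i ^^ x.testBit i) := by
      rw [← hperm.any_eq]
      simp [List.any_cons]
    rw [h1]
    have h2 := pv_any_xor_mem (P := fun x => x.testBit i) hf_mem
    simpa [List.any_cons, List.all_cons] using h2
  rw [hmask]
  have hpat : PySem.Int.band f
        (Int.not (PySem.Int.bxor (cs.foldl PySem.Int.bor c) (cs.foldl PySem.Int.band c)))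
      = PySem.Int.band (cs.foldl PySem.Int.band c)
        (Int.not (PySem.Int.bxor (cs.foldl PySem.Int.bor c) (cs.foldl PySem.Int.band c))) := by
    apply pv_int_eq_of_tb
    intro i
    rw [pv_tb_band, pv_tb_band, pv_tb_not, pv_tb_bxor, pv_tb_foldl_bor, pv_tb_foldl_band]
    cases hm : ((c.testBit i || cs.any fun x => x.testBit i) ^^ (c.testBit i && cs.all fun x => x.testBit i)) with
    | true => simp
    | false =>
      -- no disagreement at bit i: every member's bit equals f's bit
      have hagree : ∀ x ∈ c :: cs, x.testBit i = f.testBit i := by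
        intro x hx
        by_contra hne'
        have : (c :: cs).any (fun x => f.testBit i ^^ x.testBit i) = true :=
          List.any_eq_true.2 ⟨x, hx, by
            cases h1 : f.testBit i <;> cases h2 : x.testBit i <;> simp_all⟩
        rw [pv_any_xor_mem (P := fun x => x.testBit i) hf_mem] at this
        simp only [List.any_cons, List.all_cons] at this
        rw [hm] at this
        exact Bool.false_ne_true this
      have hc := hagree c (by simp)
      cases hfb : f.testBit i with
      | false =>
        simp only [hfb] at hc
        simp [hc]
      | true =>
        have hall : cs.all (fun x => x.testBit i) = true :=
          List.all_eq_true.2 (fun x hx => by rw [hagree x (by simp [hx]), hfb]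
          )
        simp [hfb, hc, hall]
  rw [hpat]

-- ===== VERDICT (by name: the statement is the Claim_ definition above) =====
theorem group_to_implicant_spec : Claim_equal_group_to_implicant := by
  intro group _hdom hpre
  unfold Spec_group_to_implicant
  cases group with
  | nil => exact absurd rfl hpre
  | cons c cs => exact group_to_implicant_spec_aux c cs
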